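-- pv_equiv track=rewrite | github.com/Glakra/MATHWIZ | streamlit_app/Grades/Year 5/Q.Data_and_graphs/interpret_dot_plots.py | most_frequent_question
-- ===== SOURCE A (Python) =====
-- def most_frequent_question(data, unit, scenario):
--     """Ask which value appears most"""
--     max_freq = max(data.values())
--     most_frequent = [k for k, v in data.items() if v == max_freq]
--     answer = min(most_frequent)
--
--     if "Drawing" in scenario["title"]:
--         question = f"Which number was drawn the most times?"
--     elif "Spinning" in scenario["title"]:
--         question = f"Which number was spun the most times?"
--     elif "Making" in scenario["title"]:
--         question = f"What number of finger puppets was made most often?"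
--     else:
--         question = f"Which value appears most often?"
--
--     return question, answer
-- ===== SOURCE B (Python) =====
-- def most_frequent_question(data, unit, scenario):
--     """Ask which value appears most (single pass: track best key/frequency)."""
--     best_key = None
--     best_freq = None
--     for k, v in data.items():
--         if best_freq is None or v > best_freq or (v == best_freq and k < best_key):
--             best_key, best_freq = k, v
--     if best_key is None:
--         raise ValueError("most_frequent_question: empty data")
--
--     title = scenario["title"]
--     if "Drawing" in title:
--         question = "Which number was drawn the most times?"
--     elif "Spinning" in title:
--         question = "Which number was spun the most times?"
--     elif "Making" in title:
--         question = "What number of finger puppets was made most often?"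
--     else:
--         question = "Which value appears most often?"
--
--     return question, best_key
-- ===== Notes on version B (the rewrite author's own statement) =====
-- stated objective: alternative
-- what changed: A's three passes (max over values, comprehension of tied keys, min over them) are fused into a single pass over data.items() that tracks the best (key, frequency) pair, updating on strictly larger frequency or equal frequency with smaller key.
import Mathlib
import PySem

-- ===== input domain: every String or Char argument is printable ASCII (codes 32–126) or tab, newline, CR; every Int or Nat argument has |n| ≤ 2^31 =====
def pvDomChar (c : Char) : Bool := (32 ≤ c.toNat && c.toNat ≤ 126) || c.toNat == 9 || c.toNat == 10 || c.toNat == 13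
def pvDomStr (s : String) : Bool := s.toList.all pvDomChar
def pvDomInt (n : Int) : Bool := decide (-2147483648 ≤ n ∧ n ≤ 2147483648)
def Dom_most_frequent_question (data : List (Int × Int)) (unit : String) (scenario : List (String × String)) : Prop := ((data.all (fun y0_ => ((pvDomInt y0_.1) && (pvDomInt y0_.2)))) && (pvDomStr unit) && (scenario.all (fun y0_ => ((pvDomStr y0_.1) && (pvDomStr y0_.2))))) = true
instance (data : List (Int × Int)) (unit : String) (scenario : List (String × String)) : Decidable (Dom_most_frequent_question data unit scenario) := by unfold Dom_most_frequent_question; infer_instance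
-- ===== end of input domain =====

-- B fuses A's three passes (max over values, list of tied keys, min over them) into one
-- pass over the dict items tracking the best (key, frequency) pair; alternative decomposition, similar cost.


-- ===== PORT A =====
-- the scenario-title branch (if/elif/else on substring tests); these Python lines are
-- verbatim identical in A and in B, so both ports share this helper
def mfqQuestion (scenario : List (String × String)) : String :=
  let title := ((PySem.Dict.ofList scenario).get? "title").getD ""   -- scenario["title"]; Pre_ requires the key
  if PySem.Str.isIn "Drawing" title then "Which number was drawn the most times?"
  else if PySem.Str.isIn "Spinning" title then "Which number was spun the most times?"
  else if PySem.Str.isIn "Making" title then "What number of finger puppets was made most often?"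
  else "Which value appears most often?"

def most_frequent_question (data : List (Int × Int)) (unit : String) (scenario : List (String × String)) : String × Int :=
  let d := PySem.Dict.ofList data
  let max_freq := (PySem.List.max? d.values (fun v => v)).getD 0   -- max(data.values()); Pre_ excludes empty data (ValueError)
  let most_frequent := (d.items.filter (fun p => p.2 == max_freq)).map (fun p => p.1)
  let answer := (PySem.List.min? most_frequent (fun k => k)).getD 0
  (mfqQuestion scenario, answer)

-- ===== PORT B =====
-- one step of B's loop: keep the better of the current best and the next (key, freq) pair
def mfqStep (acc : Option (Int × Int)) (p : Int × Int) : Option (Int × Int) :=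
  match acc with
  | none => some p
  | some b => if p.2 > b.2 ∨ (p.2 = b.2 ∧ p.1 < b.1) then some p else some b

def most_frequent_question_alt (data : List (Int × Int)) (unit : String) (scenario : List (String × String)) : String × Int :=
  let best := ((PySem.Dict.ofList data).items).foldl mfqStep none
  let answer := match best with
    | some b => b.1
    | none => 0          -- B's Python raises ValueError here; Pre_ excludes empty data
  (mfqQuestion scenario, answer)

-- ===== PRECONDITION & SPEC =====
-- Pre_ excludes empty data (Python A raises ValueError at max()) and a scenario without a
-- "title" key (Python A raises KeyError at scenario["title"]).
def Pre_most_frequent_question (data : List (Int × Int)) (unit : String) (scenario : List (String × String)) : Prop :=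
  data ≠ [] ∧ "title" ∈ scenario.map Prod.fst
instance (data : List (Int × Int)) (unit : String) (scenario : List (String × String)) : Decidable (Pre_most_frequent_question data unit scenario) := by unfold Pre_most_frequent_question; infer_instance

def pvWitness_most_frequent_question : (List (Int × Int)) × String × (List (String × String)) :=
  ([(3, 2), (1, 2), (2, 1)], "balls", [("title", "Drawing marbles")])

def Spec_most_frequent_question (data : List (Int × Int)) (unit : String) (scenario : List (String × String)) (out : String × Int) : Prop := out = most_frequent_question_alt data unit scenario
instance (data : List (Int × Int)) (unit : String) (scenario : List (String × String)) (out : String × Int) : Decidable (Spec_most_frequent_question data unit scenario out) := by unfold Spec_most_frequent_question; infer_instance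

-- ===== CLAIM (what is proved, stated in full; the proofs are below) =====
def Claim_equal_most_frequent_question : Prop := ∀ (data : List (Int × Int)) (unit : String) (scenario : List (String × String)), Dom_most_frequent_question data unit scenario → Pre_most_frequent_question data unit scenario → Spec_most_frequent_question data unit scenario (most_frequent_question data unit scenario)

-- ===== LEMMAS AND PROOFS =====

-- B's loop with a definite best so far: the Option layer disappears
def mfqStep2 (b p : Int × Int) : Int × Int :=
  if p.2 > b.2 ∨ (p.2 = b.2 ∧ p.1 < b.1) then p else b

theorem mfq_foldl_some (l : List (Int × Int)) (b : Int × Int) :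
    l.foldl mfqStep (some b) = some (l.foldl mfqStep2 b) := by
  induction l generalizing b with
  | nil => rfl
  | cons x t ih =>
      simp only [List.foldl_cons, mfqStep, mfqStep2]
      split_ifs <;> exact ih _

-- invariant of B's loop: the result is the seed or an element, its freq is maximal,
-- and its key is minimal among entries sharing that freq
theorem mfq_foldl_inv (l : List (Int × Int)) (b : Int × Int) :
    (l.foldl mfqStep2 b = b ∨ l.foldl mfqStep2 b ∈ l) ∧
    b.2 ≤ (l.foldl mfqStep2 b).2 ∧
    (∀ p ∈ l, p.2 ≤ (l.foldl mfqStep2 b).2) ∧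
    ((l.foldl mfqStep2 b).2 = b.2 → (l.foldl mfqStep2 b).1 ≤ b.1) ∧
    (∀ p ∈ l, (l.foldl mfqStep2 b).2 = p.2 → (l.foldl mfqStep2 b).1 ≤ p.1) := by
  induction l generalizing b with
  | nil => simp
  | cons x t ih =>
      simp only [List.foldl_cons, List.mem_cons]
      have step : mfqStep2 b x = x ∨ mfqStep2 b x = b := by
        unfold mfqStep2; split_ifs <;> simp
      obtain ⟨hmem, hge, hall, hmin, hallmin⟩ := ih (mfqStep2 b x)
      have hbx : b.2 ≤ (mfqStep2 b x).2 ∧ x.2 ≤ (mfqStep2 b x).2 := by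
        unfold mfqStep2; split_ifs with h
        · rcases h with h | h
          · exact ⟨le_of_lt h, le_refl _⟩
          · exact ⟨le_of_eq h.1.symm, le_refl _⟩
        · push_neg at h
          exact ⟨le_refl _, h.1⟩
      have hkx : (mfqStep2 b x).2 = b.2 → (mfqStep2 b x).1 ≤ b.1 := by
        unfold mfqStep2; split_ifs with h
        · intro he
          rcases h with h | h
          · omega
          · exact le_of_lt h.2
        · intro _; exact le_refl _
      have hkx2 : (mfqStep2 b x).2 = x.2 → (mfqStep2 b x).1 ≤ x.1 := by
        unfold mfqStep2; split_ifs with h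
        · intro _; exact le_refl _
        · push_neg at h
          intro he
          have h3 := h.2 (by omega)
          omega
      refine ⟨?_, ?_, ?_, ?_, ?_⟩
      · rcases hmem with h | h
        · rcases step with hs | hs
          · exact Or.inr (Or.inl (h.trans hs))
          · exact Or.inl (h.trans hs)
        · exact Or.inr (Or.inr h)
      · exact le_trans hbx.1 hge
      · intro p hp
        rcases hp with rfl | hp
        · exact le_trans hbx.2 hge
        · exact hall p hp
      · intro he
        have hsb : (mfqStep2 b x).2 = b.2 := le_antisymm (by omega) hbx.1
        exact le_trans (hmin (by omega)) (hkx hsb)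
      · intro p hp he
        rcases hp with heq | hp
        · subst heq
          have hsx : (mfqStep2 b p).2 = p.2 := le_antisymm (by omega) hbx.2
          exact le_trans (hmin (by omega)) (hkx2 hsx)
        · exact hallmin p hp he

-- a dict built from a nonempty pair list has nonempty items
theorem items_update_ne_nil {κ ν : Type} [BEq κ] (l : List (κ × ν)) (d : PySem.Dict κ ν)
    (h : d.items ≠ []) : (d.update l).items ≠ [] := by
  induction l generalizing d with
  | nil => exact h
  | cons p t ih =>
      have hins : (d.insert p.1 p.2).items ≠ [] := by
        rw [PySem.Dict.items_insert]
        split_ifs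
        · simp only [ne_eq, List.map_eq_nil_iff]; exact h
        · simp
      exact ih _ hins

theorem items_ofList_ne_nil (data : List (Int × Int)) (h : data ≠ []) :
    (PySem.Dict.ofList data).items ≠ [] := by
  cases data with
  | nil => exact absurd rfl h
  | cons p t =>
      show ((PySem.Dict.empty.insert p.1 p.2).update t).items ≠ []
      exact items_update_ne_nil t _ (by rw [PySem.Dict.items_insert]; simp [PySem.Dict.empty])

-- ===== VERDICT (by name: the statement is the Claim_ definition above) =====
theorem most_frequent_question_spec : Claim_equal_most_frequent_question := by
  intro data unit scenario _ hpre
  unfold Spec_most_frequent_question most_frequent_question most_frequent_question_alt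
  obtain ⟨x, t, hxt⟩ := List.exists_cons_of_ne_nil (items_ofList_ne_nil data hpre.1)
  simp only [hxt, List.foldl_cons]
  -- characterize B's loop result r
  rw [show mfqStep none x = some x from rfl, mfq_foldl_some]
  obtain ⟨hmem, hx2, hall, hxmin, hallmin⟩ := mfq_foldl_inv t x
  set r := t.foldl mfqStep2 x with hr
  have hrmem : r ∈ x :: t := by
    rcases hmem with h | h
    · rw [h]; exact List.mem_cons_self
    · exact List.mem_cons_of_mem _ h
  have hrall : ∀ p ∈ x :: t, p.2 ≤ r.2 := by
    intro p hp
    rcases List.mem_cons.mp hp with rfl | hp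
    · exact hx2
    · exact hall p hp
  have hrmin : ∀ p ∈ x :: t, r.2 = p.2 → r.1 ≤ p.1 := by
    intro p hp
    rcases List.mem_cons.mp hp with rfl | hp
    · exact hxmin
    · exact hallmin p hp
  -- characterize A's max_freq
  have hvals : (PySem.Dict.ofList data).values = (x :: t).map (fun p => p.2) := by
    simp only [PySem.Dict.values, hxt]
  rw [hvals]
  cases hm : PySem.List.max? ((x :: t).map (fun p => p.2)) (fun v => v) with
  | none => exact absurd ((PySem.List.max?_eq_none_iff _ _).mp hm) (by simp)
  | some m =>
      have hm_mem : ∃ p ∈ x :: t, p.2 = m := by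
        obtain ⟨p, hp, hpm⟩ := List.mem_map.mp (PySem.List.max?_mem hm)
        exact ⟨p, hp, hpm⟩
      have hm_max : ∀ p ∈ x :: t, p.2 ≤ m := by
        intro p hp
        exact PySem.List.max?_isMax hm p.2 (List.mem_map.mpr ⟨p, hp, rfl⟩)
      have hmr : m = r.2 := by
        obtain ⟨p, hp, hpm⟩ := hm_mem
        exact le_antisymm (hpm ▸ hrall p hp) (hm_max r hrmem)
      -- characterize A's answer: min over the keys tied at max_freq is r.1
      have hrfilt : r.1 ∈ ((x :: t).filter (fun p => p.2 == (some m).getD 0)).map (fun p => p.1) := by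
        refine List.mem_map.mpr ⟨r, List.mem_filter.mpr ⟨hrmem, ?_⟩, rfl⟩
        simp [Option.getD, hmr]
      cases hk : PySem.List.min? (((x :: t).filter (fun p => p.2 == (some m).getD 0)).map (fun p => p.1)) (fun k => k) with
      | none =>
          rw [(PySem.List.min?_eq_none_iff _ _).mp hk] at hrfilt
          exact absurd hrfilt (List.not_mem_nil)
      | some kA =>
          have hkA : kA = r.1 := by
            have h1 : r.1 ≤ kA := by
              obtain ⟨p, hp, hpk⟩ := List.mem_map.mp (PySem.List.min?_mem hk)
              obtain ⟨hpmem, hpeq⟩ := List.mem_filter.mp hp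
              have hpm : p.2 = m := by simpa using hpeq
              exact hpk ▸ hrmin p hpmem (hmr ▸ hpm.symm ▸ rfl)
            have h2 : kA ≤ r.1 := PySem.List.min?_isMin hk r.1 hrfilt
            omega
          simp [hkA]
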